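-- pv_equiv track=rewrite | github.com/ebgdae/language-detection | text_processing_utils.py | get_distribution_distance
-- ===== SOURCE A (Python) =====
-- from typing import List, Tuple, Dict
--
-- def get_distribution_distance(language_dict: List[Tuple[str, int]], sample_dict: List[Tuple[str, int]]) -> int:
--     """
--     get_distribution_distance A distance metric between a language ngram frequency distribution and
--     a text sample ngram frequency distribution
--
--     Parameters
--     ----------
--     language_dict : List
--         eg. [('a',10), ('e',4), ('b',2)]
--     sample_dict : List
--         same structure as language_dict
--
--     Returns
--     -------
--     int
--         a distance measure
--     """
--     distance = 0
--     for i in range(len(sample_dict)):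
--         present = False
--         for j in range(len(language_dict)):
--             if sample_dict[i][0] == language_dict[j][0]:
--                 present = True
--                 distance += abs(i-j)
--         if not present:
--             distance += len(sample_dict)-i
--     return distance
-- ===== SOURCE B (Python) =====
-- def get_distribution_distance(language_dict, sample_dict):
--     n = len(sample_dict)
--     sgroups = {}
--     for i, (key, _) in enumerate(sample_dict):
--         sgroups.setdefault(key, []).append(i)
--     lgroups = {}
--     for j, (key, _) in enumerate(language_dict):
--         lgroups.setdefault(key, []).append(j)
--     total = 0
--     for key, sids in sgroups.items():
--         if key in lgroups:
--             total += sum(abs(i - j) for i in sids for j in lgroups[key])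
--         else:
--             total += sum(n - i for i in sids)
--     return total
-- ===== Notes on version B (the rewrite author's own statement) =====
-- stated objective: faster
-- what changed: Hash group-by aggregation: both lists are grouped by key into index lists in one pass each, then one aggregation pass over the distinct sample keys sums each group's contribution, eliminating A's per-sample-entry scan of language_dict.
import Mathlib
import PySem

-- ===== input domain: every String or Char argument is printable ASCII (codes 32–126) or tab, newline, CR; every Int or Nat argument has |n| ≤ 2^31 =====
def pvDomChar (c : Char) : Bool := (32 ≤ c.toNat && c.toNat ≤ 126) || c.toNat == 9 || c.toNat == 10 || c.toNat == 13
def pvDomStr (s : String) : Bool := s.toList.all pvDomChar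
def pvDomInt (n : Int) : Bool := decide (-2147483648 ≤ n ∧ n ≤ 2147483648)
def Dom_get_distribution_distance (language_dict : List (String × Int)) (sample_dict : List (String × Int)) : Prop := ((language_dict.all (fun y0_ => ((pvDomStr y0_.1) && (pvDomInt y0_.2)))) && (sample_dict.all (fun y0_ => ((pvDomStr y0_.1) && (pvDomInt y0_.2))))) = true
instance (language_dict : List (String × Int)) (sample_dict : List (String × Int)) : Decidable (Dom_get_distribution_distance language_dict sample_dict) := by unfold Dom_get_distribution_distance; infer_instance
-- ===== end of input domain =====

-- B replaces A's nested positional scans by a hash group-by aggregation: both lists are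
-- grouped by key into index lists, then one pass over the distinct sample keys sums each
-- group's contribution (correct because Int addition lets the sum be reorganised by key).

-- ===== PORT A =====
def get_distribution_distance (language_dict : List (String × Int)) (sample_dict : List (String × Int)) : Int :=
  (PySem.List.pyRange 0 (PySem.List.len sample_dict)).foldl
    (fun distance i =>
      let st := (PySem.List.pyRange 0 (PySem.List.len language_dict)).foldl
        (fun (st : Bool × Int) j =>
          if (PySem.List.pyGetD sample_dict i ("", 0)).1 = (PySem.List.pyGetD language_dict j ("", 0)).1
          then (true, st.2 + |i - j|) else st)
        (false, distance)
      if !st.1 then st.2 + (PySem.List.len sample_dict - i) else st.2)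
    0

-- ===== PORT B =====
def get_distribution_distance_alt (language_dict : List (String × Int)) (sample_dict : List (String × Int)) : Int :=
  let n := PySem.List.len sample_dict
  let sgroups : PySem.Dict String (List Int) :=
    (PySem.List.enumerate sample_dict 0).foldl
      (fun d ip => d.modify ip.2.1 [] (fun js => js ++ [ip.1])) PySem.Dict.empty
  let lgroups : PySem.Dict String (List Int) :=
    (PySem.List.enumerate language_dict 0).foldl
      (fun d jp => d.modify jp.2.1 [] (fun js => js ++ [jp.1])) PySem.Dict.empty
  sgroups.items.foldl
    (fun total kS =>
      if lgroups.contains kS.1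
      then total + (kS.2.flatMap (fun i => (lgroups.getD kS.1 []).map (fun j => |i - j|))).sum
      else total + (kS.2.map (fun i => n - i)).sum)
    0

-- ===== PRECONDITION & SPEC =====
def Spec_get_distribution_distance (language_dict : List (String × Int)) (sample_dict : List (String × Int)) (out : Int) : Prop := out = get_distribution_distance_alt language_dict sample_dict
instance (language_dict : List (String × Int)) (sample_dict : List (String × Int)) (out : Int) : Decidable (Spec_get_distribution_distance language_dict sample_dict out) := by unfold Spec_get_distribution_distance; infer_instance

-- ===== CLAIM (what is proved, stated in full; the proofs are below) =====
def Claim_equal_get_distribution_distance : Prop := ∀ (language_dict : List (String × Int)) (sample_dict : List (String × Int)), Dom_get_distribution_distance language_dict sample_dict → Spec_get_distribution_distance language_dict sample_dict (get_distribution_distance language_dict sample_dict)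

-- ===== LEMMAS AND PROOFS =====

-- the list of indices (counting from s) whose key equals `key`
def pvMatchJs (key : String) (l : List (String × Int)) (s : Int) : List Int :=
  (PySem.List.enumerate l s).filterMap (fun jp => if key = jp.2.1 then some jp.1 else none)

-- per-entry contribution of a sample entry with key k at index i (the common spec)
def pvContrib (ld : List (String × Int)) (n : Int) (k : String) (i : Int) : Int :=
  if ld.any (fun p => k == p.1) then ((pvMatchJs k ld 0).map (fun j => |i - j|)).sum else n - i

theorem pvMatchJs_nil (key : String) (s : Int) : pvMatchJs key [] s = [] := rfl

theorem pvMatchJs_cons (key : String) (p : String × Int) (l : List (String × Int)) (s : Int) :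
    pvMatchJs key (p :: l) s
      = (if key = p.1 then [s] else []) ++ pvMatchJs key l (s + 1) := by
  unfold pvMatchJs
  rw [PySem.List.enumerate_cons, List.filterMap_cons]
  split_ifs <;> simp

theorem pvMatchJs_eq_nil (key : String) (l : List (String × Int))
    (s : Int) (h : l.any (fun p => key == p.1) = false) :
    pvMatchJs key l s = [] := by
  induction l generalizing s with
  | nil => rfl
  | cons p l ih =>
    simp only [List.any_cons, Bool.or_eq_false_iff, beq_eq_false_iff_ne] at h
    rw [pvMatchJs_cons, if_neg h.1, ih (s + 1) h.2]
    simp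

-- the group dictionaries: getD and contains of the building fold
theorem pvBuild_getD (l : List (String × Int)) :
    ∀ (s : Int) (d : PySem.Dict String (List Int)) (k : String),
      ((PySem.List.enumerate l s).foldl
          (fun d jp => d.modify jp.2.1 [] (fun js => js ++ [jp.1])) d).getD k []
        = d.getD k [] ++ pvMatchJs k l s := by
  induction l with
  | nil => intro s d k; simp [pvMatchJs_nil]
  | cons p l ih =>
    intro s d k
    rw [PySem.List.enumerate_cons, List.foldl_cons, ih, pvMatchJs_cons,
      PySem.Dict.getD_modify]
    split_ifs with h1 <;> simp [h1]

theorem pvBuild_contains (l : List (String × Int)) :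
    ∀ (s : Int) (d : PySem.Dict String (List Int)) (k : String),
      ((PySem.List.enumerate l s).foldl
          (fun d jp => d.modify jp.2.1 [] (fun js => js ++ [jp.1])) d).contains k
        = (d.contains k || l.any (fun p => k == p.1)) := by
  induction l with
  | nil => intro s d k; simp
  | cons p l ih =>
    intro s d k
    rw [PySem.List.enumerate_cons, List.foldl_cons, ih, PySem.Dict.contains_modify]
    simp only [List.any_cons]
    rw [Bool.or_left_comm, Bool.or_assoc]

-- A's inner loop over the language list, in enumerate form
theorem pvInner_fold (key : String) (i : Int) (l : List (String × Int)) :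
    ∀ (s : Int) (b : Bool) (d0 : Int),
      (PySem.List.enumerate l s).foldl
          (fun (st : Bool × Int) jp =>
            if key = jp.2.1 then (true, st.2 + |i - jp.1|) else st) (b, d0)
        = (b || l.any (fun p => key == p.1),
           d0 + ((pvMatchJs key l s).map (fun j => |i - j|)).sum) := by
  induction l with
  | nil => intro s b d0; simp [pvMatchJs_nil]
  | cons p l ih =>
    intro s b d0
    rw [PySem.List.enumerate_cons, List.foldl_cons]
    by_cases h : key = p.1
    · have h' : (if key = (s, p).2.1 then (true, (b, d0).2 + |i - (s, p).1|) else (b, d0))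
          = (true, d0 + |i - s|) := by simp [h]
      rw [h', ih, pvMatchJs_cons, if_pos h]
      simp [h, add_assoc]
    · have h' : (if key = (s, p).2.1 then (true, (b, d0).2 + |i - (s, p).1|) else (b, d0))
          = (b, d0) := by simp [h]
      rw [h', ih, pvMatchJs_cons, if_neg h]
      have hb : (key == p.1) = false := beq_eq_false_iff_ne.mpr h
      simp [hb]

-- a fold over range(len xs) is a fold over enumerate(xs) using only the index
theorem pvFoldl_pyRange_enum {β : Type} (xs : List (String × Int)) (f : β → Int → β) (init : β) :
    (PySem.List.pyRange 0 (PySem.List.len xs)).foldl f init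
      = (PySem.List.enumerate xs 0).foldl (fun acc jp => f acc jp.1) init := by
  have h : PySem.List.pyRange 0 (PySem.List.len xs)
      = (PySem.List.enumerate xs 0).map (fun x => x.1) := by
    rw [PySem.List.map_fst_enumerate]
    simp [PySem.List.len]
  rw [h, List.foldl_map]

-- inside enumerate xs 0, pyGetD at the first component is the second component
theorem pvGetD_mem_enum (xs : List (String × Int)) (jp : Int × (String × Int))
    (h : jp ∈ PySem.List.enumerate xs 0) :
    PySem.List.pyGetD xs jp.1 ("", 0) = jp.2 := by
  rw [PySem.List.mem_enumerate_iff] at h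
  obtain ⟨k, hk, rfl⟩ := h
  simp [PySem.List.pyGetD_natCast, List.getD_eq_getElem?_getD, hk]

-- A equals the sum of per-entry contributions over enumerate(sample_dict)
theorem pvA_char (ld sd : List (String × Int)) :
    get_distribution_distance ld sd
      = ((PySem.List.enumerate sd 0).map
          (fun ip => pvContrib ld (PySem.List.len sd) ip.2.1 ip.1)).sum := by
  unfold get_distribution_distance
  rw [pvFoldl_pyRange_enum]
  rw [PySem.List.foldl_congr_mem _ _
    (fun acc ip => acc + pvContrib ld (PySem.List.len sd) ip.2.1 ip.1) _
    (by
      intro acc ip hip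
      rw [pvFoldl_pyRange_enum]
      have hkey : PySem.List.pyGetD sd ip.1 ("", 0) = ip.2 := pvGetD_mem_enum sd ip hip
      rw [PySem.List.foldl_congr_mem _ _
        (fun (st : Bool × Int) jp =>
          if ip.2.1 = jp.2.1 then (true, st.2 + |ip.1 - jp.1|) else st) _
        (by intro st jp hjp; rw [hkey, pvGetD_mem_enum ld jp hjp])]
      rw [pvInner_fold]
      unfold pvContrib
      by_cases h : ld.any (fun p => ip.2.1 == p.1) = true
      · simp [h]
      · rw [Bool.not_eq_true] at h
        rw [pvMatchJs_eq_nil ip.2.1 ld 0 h]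
        simp [h])]
  rw [PySem.List.foldl_add]
  simp

-- replacing the unique entry at key k of an items list by its appended version adds c k s
theorem pvSum_flatMap (l : List Int) (f : Int → List Int) :
    (l.flatMap f).sum = (l.map (fun x => (f x).sum)).sum := by
  induction l with
  | nil => rfl
  | cons a t ih => simp [List.flatMap_cons, ih]

theorem pvSum_replace (c : String → Int → Int) (k : String) (S0 : List Int) (s : Int) :
    ∀ (its : List (String × List Int)), (its.map Prod.fst).Nodup → (k, S0) ∈ its →
      ((its.map (fun p => if p.1 == k then (k, S0 ++ [s]) else p)).map
          (fun kS => (kS.2.map (c kS.1)).sum)).sum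
        = (its.map (fun kS => (kS.2.map (c kS.1)).sum)).sum + c k s := by
  intro its
  induction its with
  | nil => intro _ h; simp at h
  | cons p t ih =>
    intro hnd hmem
    simp only [List.map_cons, List.nodup_cons, List.mem_map] at hnd
    by_cases hp : p.1 = k
    · have hpeq : p = (k, S0) := by
        rcases List.mem_cons.mp hmem with h | h
        · exact h.symm
        · exact absurd ⟨(k, S0), h, by rw [hp]⟩ hnd.1
      have ht : t.map (fun p => if p.1 == k then (k, S0 ++ [s]) else p) = t := by
        conv_rhs => rw [← List.map_id t]
        apply List.map_congr_left
        intro q hq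
        have hqk : q.1 ≠ k := by
          intro hc
          exact hnd.1 ⟨q, hq, by rw [hc, hp]⟩
        simp [hqk]
      simp only [List.map_cons, hpeq, beq_self_eq_true, if_pos, ht]
      simp only [List.sum_cons, List.map_append, List.sum_append, List.map_cons,
        List.map_nil, List.sum_nil]
      ring
    · have hmem' : (k, S0) ∈ t := by
        rcases List.mem_cons.mp hmem with h | h
        · exact absurd (by rw [← h]) hp
        · exact h
      have hnd' : (t.map Prod.fst).Nodup := hnd.2
      have hb : (p.1 == k) = false := beq_eq_false_iff_ne.mpr hp
      simp only [List.map_cons, hb, Bool.false_eq_true, if_false, List.sum_cons]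
      rw [ih hnd' hmem']
      ring

-- summing a per-index contribution over the groups of the building fold
theorem pvSum_groups (c : String → Int → Int) (l : List (String × Int)) :
    ∀ (s : Int) (d : PySem.Dict String (List Int)), d.keys.Nodup →
      (((PySem.List.enumerate l s).foldl
            (fun d ip => d.modify ip.2.1 [] (fun js => js ++ [ip.1])) d).items.map
          (fun kS => (kS.2.map (c kS.1)).sum)).sum
        = (d.items.map (fun kS => (kS.2.map (c kS.1)).sum)).sum
            + ((PySem.List.enumerate l s).map (fun ip => c ip.2.1 ip.1)).sum := by
  induction l with
  | nil => intro s d _; simp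
  | cons p l ih =>
    intro s d hnd
    rw [PySem.List.enumerate_cons, List.foldl_cons]
    have hstep : ((d.modify p.1 [] (fun js => js ++ [s])).items.map
          (fun kS => (kS.2.map (c kS.1)).sum)).sum
        = (d.items.map (fun kS => (kS.2.map (c kS.1)).sum)).sum + c p.1 s := by
      show (((d.insert p.1 (d.getD p.1 [] ++ [s])).items).map
          (fun kS => (kS.2.map (c kS.1)).sum)).sum = _
      rw [PySem.Dict.items_insert]
      by_cases hc : d.contains p.1 = true
      · rw [if_pos hc]
        have hk : p.1 ∈ d.keys := (PySem.Dict.contains_iff_mem_keys d p.1).mp hc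
        have hkeys : d.keys = d.items.map Prod.fst := rfl
        rw [hkeys] at hk
        obtain ⟨q, hq, hq1⟩ := List.mem_map.mp hk
        have hqS : d.getD p.1 [] = q.2 := by
          have : (p.1, q.2) ∈ d.items := by rw [← hq1]; exact hq
          exact PySem.Dict.getD_of_mem_items d this hnd []
        rw [hqS]
        have hndm : (d.items.map Prod.fst).Nodup := by rw [← hkeys]; exact hnd
        have hmem : (p.1, q.2) ∈ d.items := by rw [← hq1]; exact hq
        exact pvSum_replace c p.1 q.2 s d.items hndm hmem
      · rw [if_neg hc]
        have hg : d.getD p.1 [] = [] :=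
          PySem.Dict.getD_of_not_contains d [] (by simpa using hc)
        rw [hg]
        simp
    have hnd' : (d.modify p.1 [] (fun js => js ++ [s])).keys.Nodup := by
      show (d.insert p.1 (d.getD p.1 [] ++ [s])).keys.Nodup
      exact PySem.Dict.nodup_keys_insert d _ _ hnd
    rw [ih (s + 1) _ hnd', hstep]
    simp only [List.map_cons, List.sum_cons]
    ring

-- ===== VERDICT (by name: the statement is the Claim_ definition above) =====
theorem get_distribution_distance_spec : Claim_equal_get_distribution_distance := by
  intro ld sd _
  show get_distribution_distance ld sd = get_distribution_distance_alt ld sd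
  rw [pvA_char]
  unfold get_distribution_distance_alt
  rw [PySem.List.foldl_congr_mem _ _
    (fun (total : Int) kS =>
      total + (if ((PySem.List.enumerate ld 0).foldl
            (fun d jp => d.modify jp.2.1 [] (fun js => js ++ [jp.1]))
            PySem.Dict.empty).contains kS.1
        then (kS.2.flatMap (fun i =>
            (((PySem.List.enumerate ld 0).foldl
                (fun d jp => d.modify jp.2.1 [] (fun js => js ++ [jp.1]))
                PySem.Dict.empty).getD kS.1 []).map (fun j => |i - j|))).sum
        else (kS.2.map (fun i => PySem.List.len sd - i)).sum)) _
    (by intro acc kS _; dsimp only; split_ifs <;> rfl)]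
  rw [PySem.List.foldl_add]
  have hmap : ∀ kS : String × List Int,
      (if ((PySem.List.enumerate ld 0).foldl
            (fun d jp => d.modify jp.2.1 [] (fun js => js ++ [jp.1]))
            PySem.Dict.empty).contains kS.1
        then (kS.2.flatMap (fun i =>
            (((PySem.List.enumerate ld 0).foldl
                (fun d jp => d.modify jp.2.1 [] (fun js => js ++ [jp.1]))
                PySem.Dict.empty).getD kS.1 []).map (fun j => |i - j|))).sum
        else (kS.2.map (fun i => PySem.List.len sd - i)).sum)
      = (kS.2.map (pvContrib ld (PySem.List.len sd) kS.1)).sum := by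
    intro kS
    rw [pvBuild_contains, pvBuild_getD]
    simp only [PySem.Dict.contains_empty, PySem.Dict.getD_empty, Bool.false_or,
      List.nil_append]
    unfold pvContrib
    by_cases h : ld.any (fun p => kS.1 == p.1) = true
    · rw [if_pos h]
      simp only [h, if_true]
      rw [pvSum_flatMap]
    · rw [Bool.not_eq_true] at h
      rw [if_neg (by simp [h])]
      simp [h]
  rw [List.map_congr_left (fun kS _ => hmap kS)]
  rw [pvSum_groups (pvContrib ld (PySem.List.len sd)) sd 0 PySem.Dict.empty
    PySem.Dict.nodup_keys_empty]
  simp [PySem.Dict.empty]
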